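-- pv_equiv track=rewrite | github.com/DenysPtyts/test-task-amazinum | Task1.py | deepest_lake_depth
-- ===== SOURCE A (Python) =====
-- def deepest_lake_depth(heights):
--     max_depth = 0
--     start_index = 0
--     end_index = 0
--     n = len(heights)
--
--     for i in range(n):
--         for j in range(i + 2, n):  # Мінімум 2 значення між вершинами
--             if heights[j] > heights[i]:  # Переконуємося, що j — це друга вершина
--                 min_inside = min(heights[i+1:j])
--                 lake_depth = min(heights[i], heights[j]) - min_inside
--                 if lake_depth > max_depth:
--                     max_depth = lake_depth
--                     start_index = i
--                     end_index = j
--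
--     return max_depth, start_index, end_index
-- ===== SOURCE B (Python) =====
-- def deepest_lake_depth(heights):
--     best_depth, best_i, best_j = 0, 0, 0
--     for i, hi in enumerate(heights):
--         valley = None
--         for j, hj in enumerate(heights[i + 1:], start=i + 1):
--             if valley is not None and hj > hi:
--                 # hj > hi, so min(hi, hj) == hi: depth is hi minus the valley floor
--                 d = hi - valley
--                 if d > best_depth:
--                     best_depth, best_i, best_j = d, i, j
--             valley = hj if valley is None else min(valley, hj)
--     return best_depth, best_i, best_j
-- ===== Notes on version B (the rewrite author's own statement) =====
-- stated objective: faster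
-- what changed: B walks the list of suffixes directly, threading a running valley minimum (seeded as None so pairs closer than 2 apart are impossible by construction) and using the identity min(h[i],h[j]) = h[i] when h[j] > h[i], so A's per-pair O(n) slice-minimum recomputation disappears.
import Mathlib
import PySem

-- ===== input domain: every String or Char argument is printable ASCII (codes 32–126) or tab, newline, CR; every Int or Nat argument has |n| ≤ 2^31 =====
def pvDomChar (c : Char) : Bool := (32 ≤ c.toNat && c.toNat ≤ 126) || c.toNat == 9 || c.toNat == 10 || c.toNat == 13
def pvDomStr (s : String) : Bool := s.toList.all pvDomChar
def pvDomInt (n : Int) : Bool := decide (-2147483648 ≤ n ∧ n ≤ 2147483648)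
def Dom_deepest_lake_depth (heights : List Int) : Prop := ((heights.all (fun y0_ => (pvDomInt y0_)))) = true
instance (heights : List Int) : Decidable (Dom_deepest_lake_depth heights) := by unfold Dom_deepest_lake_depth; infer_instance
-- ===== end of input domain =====

-- B recurses over the suffixes of the list, threading a running valley minimum (seeded
-- as None, which makes adjacent pairs impossible by construction) and uses the identity
-- min(h[i],h[j]) = h[i] when h[j] > h[i]; A recomputes min(heights[i+1:j]) per pair.

-- ===== PORT A =====
-- Inner-loop body of A: if heights[j] > heights[i], min_inside = min(heights[i+1:j])
-- (the slice is nonempty since j ≥ i+2, so the .getD 0 default is never used).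
def dlBodyA (xs : List Int) (i : Int) (st : Int × Int × Int) (j : Int) : Int × Int × Int :=
  if PySem.List.pyGetD xs i 0 < PySem.List.pyGetD xs j 0 then
    let min_inside :=
      (PySem.List.min? (PySem.List.slice xs (some (i + 1)) (some j)) (fun x => x)).getD 0
    let lake_depth := min (PySem.List.pyGetD xs i 0) (PySem.List.pyGetD xs j 0) - min_inside
    if st.1 < lake_depth then (lake_depth, i, j) else st
  else st

-- Literal port of A; state is (max_depth, start_index, end_index).
def deepest_lake_depth (heights : List Int) : List Int :=
  let n : Int := heights.length
  let st :=
    (PySem.List.pyRange 0 n 1).foldl (fun st i =>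
      (PySem.List.pyRange (i + 2) n 1).foldl (dlBodyA heights i) st) (0, 0, 0)
  [st.1, st.2.1, st.2.2]

-- ===== PORT B =====
-- Inner loop of B: walk the suffix heights[i+1:] with its index j, carrying the valley
-- minimum as an Option (none until the first element has been seen) and the best state.
def dlInnerB (hi : Int) (i : Int) : List Int → Int → Option Int → Int × Int × Int → Int × Int × Int
  | [], _, _, st => st
  | hj :: rest, j, valley, st =>
    let st' :=
      match valley with
      | some v => if hi < hj then (if st.1 < hi - v then (hi - v, i, j) else st) else st
      | none => st
    let valley' := match valley with | none => some hj | some v => some (min v hj)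
    dlInnerB hi i rest (j + 1) valley' st'

-- Outer loop of B: recursion over the list itself, i the index of the current head.
def dlOuterB : List Int → Int → Int × Int × Int → Int × Int × Int
  | [], _, st => st
  | hi :: rest, i, st => dlOuterB rest (i + 1) (dlInnerB hi i rest (i + 1) none st)

def deepest_lake_depth_alt (heights : List Int) : List Int :=
  let st := dlOuterB heights 0 (0, 0, 0)
  [st.1, st.2.1, st.2.2]

-- ===== PRECONDITION & SPEC =====
def Spec_deepest_lake_depth (heights : List Int) (out : List Int) : Prop := out = deepest_lake_depth_alt heights
instance (heights : List Int) (out : List Int) : Decidable (Spec_deepest_lake_depth heights out) := by unfold Spec_deepest_lake_depth; infer_instance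

-- ===== CLAIM (what is proved, stated in full; the proofs are below) =====
def Claim_equal_deepest_lake_depth : Prop := ∀ (heights : List Int), Dom_deepest_lake_depth heights → Spec_deepest_lake_depth heights (deepest_lake_depth heights)

-- ===== LEMMAS AND PROOFS =====

-- min over a list extended on the right (list nonempty).
theorem dl_min_getD_snoc (l : List Int) (x : Int) (h : l ≠ []) :
    (PySem.List.min? (l ++ [x]) (fun y => y)).getD 0
      = min ((PySem.List.min? l (fun y => y)).getD 0) x := by
  cases l with
  | nil => exact absurd rfl h
  | cons y t => simp [PySem.List.min?_id_cons, List.foldl_append]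

-- Extending a slice one step to the right appends element a.
theorem dl_slice_snoc (xs : List Int) (p a : Int) (h0 : 0 ≤ p) (hpa : p ≤ a)
    (han : a < (xs.length : Int)) :
    PySem.List.slice xs (some p) (some (a + 1))
      = PySem.List.slice xs (some p) (some a) ++ [PySem.List.pyGetD xs a 0] := by
  have ha0 : (0 : Int) ≤ a := le_trans h0 hpa
  rw [PySem.List.slice_toNat xs h0 (by omega), PySem.List.slice_toNat xs h0 ha0]
  have h1 : (a + 1).toNat - p.toNat = (a.toNat - p.toNat) + 1 := by omega
  rw [h1, List.take_add_one]
  have hlt : a.toNat < xs.length := by omega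
  have h2 : (xs.drop p.toNat)[a.toNat - p.toNat]? = some (PySem.List.pyGetD xs a 0) := by
    rw [List.getElem?_drop]
    have hidx : p.toNat + (a.toNat - p.toNat) = a.toNat := by omega
    rw [hidx, PySem.List.pyGetD_eq_getElem xs 0 ha0 han, List.getElem?_eq_getElem hlt]
  simp [h2]

theorem dl_slice_ne_nil (xs : List Int) (p a : Int) (h0 : 0 ≤ p) (hpa : p < a)
    (hpn : p < (xs.length : Int)) :
    PySem.List.slice xs (some p) (some a) ≠ [] := by
  rw [PySem.List.slice_toNat xs h0 (by omega)]
  intro h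
  have := congrArg List.length h
  simp [List.length_take, List.length_drop] at this
  omega

-- Inner-loop invariant: once the valley holds min(heights[i+1:a]), B's suffix recursion
-- from position a computes exactly A's inner fold over range(a, n).
theorem dl_inner_eq (xs : List Int) (i : Int) (hi0 : 0 ≤ i) (k : Nat) :
    ∀ (a v : Int) (st : Int × Int × Int),
      i + 2 ≤ a → ((xs.length : Int) - a).toNat = k →
      v = (PySem.List.min? (PySem.List.slice xs (some (i + 1)) (some a)) (fun y => y)).getD 0 →
      (PySem.List.pyRange a (xs.length : Int) 1).foldl (dlBodyA xs i) st
        = dlInnerB (PySem.List.pyGetD xs i 0) i (xs.drop a.toNat) a (some v) st := by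
  induction k with
  | zero =>
    intro a v st ha hk hv
    rw [PySem.List.pyRange_one_eq_nil (by omega), List.drop_eq_nil_of_le (by omega)]
    rfl
  | succ k ih =>
    intro a v st ha hk hv
    have han : a < (xs.length : Int) := by omega
    have hlt : a.toNat < xs.length := by omega
    have hdrop : xs.drop a.toNat = xs[a.toNat] :: xs.drop (a.toNat + 1) :=
      List.drop_eq_getElem_cons hlt
    rw [PySem.List.pyRange_one_cons han, List.foldl_cons, hdrop]
    have hget : xs[a.toNat] = PySem.List.pyGetD xs a 0 :=
      (PySem.List.pyGetD_eq_getElem xs 0 (by omega) han).symm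
    have hstep : dlBodyA xs i st a
        = (if PySem.List.pyGetD xs i 0 < xs[a.toNat] then
            (if st.1 < PySem.List.pyGetD xs i 0 - v then (PySem.List.pyGetD xs i 0 - v, i, a) else st)
          else st) := by
      rw [hget]
      simp only [dlBodyA, ← hv]
      by_cases h1 : PySem.List.pyGetD xs i 0 < PySem.List.pyGetD xs a 0
      · simp only [if_pos h1, min_eq_left (le_of_lt h1)]
      · simp only [if_neg h1]
    have hv' : min v xs[a.toNat]
        = (PySem.List.min? (PySem.List.slice xs (some (i + 1)) (some (a + 1))) (fun y => y)).getD 0 := by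
      rw [dl_slice_snoc xs (i + 1) a (by omega) (by omega) han,
          dl_min_getD_snoc _ _ (dl_slice_ne_nil xs (i + 1) a (by omega) (by omega) (by omega)),
          hv, hget]
    rw [dlInnerB, ← hstep]
    have h1 : a.toNat + 1 = (a + 1).toNat := by omega
    rw [h1]
    exact (ih (a + 1) _ (dlBodyA xs i st a) (by omega) (by omega) hv')

-- Start of a row: B's inner recursion from the whole suffix heights[i+1:] with empty
-- valley equals A's inner fold over range(i+2, n).
theorem dl_row_eq (xs : List Int) (i : Int) (hi0 : 0 ≤ i) (hin : i < (xs.length : Int))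
    (st : Int × Int × Int) :
    (PySem.List.pyRange (i + 2) (xs.length : Int) 1).foldl (dlBodyA xs i) st
      = dlInnerB (PySem.List.pyGetD xs i 0) i (xs.drop (i.toNat + 1)) (i + 1) none st := by
  by_cases h1 : i + 1 < (xs.length : Int)
  · have hlt : i.toNat + 1 < xs.length := by omega
    have hdrop : xs.drop (i.toNat + 1) = xs[i.toNat + 1] :: xs.drop (i.toNat + 2) :=
      List.drop_eq_getElem_cons hlt
    rw [hdrop, dlInnerB]
    have hget : xs[i.toNat + 1] = PySem.List.pyGetD xs (i + 1) 0 := by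
      rw [PySem.List.pyGetD_eq_getElem xs 0 (by omega) h1]
      congr 1
      omega
    have hsingle : PySem.List.slice xs (some (i + 1)) (some (i + 2))
        = [PySem.List.pyGetD xs (i + 1) 0] := by
      have := dl_slice_snoc xs (i + 1) (i + 1) (by omega) (le_refl _) (by omega)
      rw [show (i + 1) + 1 = i + 2 by ring] at this
      rw [this, PySem.List.slice_toNat xs (by omega) (by omega)]
      simp
    have hv : xs[i.toNat + 1]
        = (PySem.List.min? (PySem.List.slice xs (some (i + 1)) (some (i + 2))) (fun y => y)).getD 0 := by
      rw [hsingle, hget]; simp [PySem.List.min?_id_cons]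
    have h2 : i.toNat + 2 = (i + 2).toNat := by omega
    have := dl_inner_eq xs i hi0 (((xs.length : Int) - (i + 2)).toNat) (i + 2) xs[i.toNat + 1] st
      (le_refl _) rfl hv
    rw [show (i + 1) + 1 = i + 2 by ring, h2]
    exact this
  · rw [PySem.List.pyRange_one_eq_nil (by omega), List.drop_eq_nil_of_le (by omega)]
    rfl

-- Outer-loop invariant: A's fold over range(i, n) equals B's recursion over drop i.
theorem dl_outer_eq (xs : List Int) (k : Nat) :
    ∀ (i : Int) (st : Int × Int × Int), 0 ≤ i → ((xs.length : Int) - i).toNat = k →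
      (PySem.List.pyRange i (xs.length : Int) 1).foldl (fun st i =>
          (PySem.List.pyRange (i + 2) (xs.length : Int) 1).foldl (dlBodyA xs i) st) st
        = dlOuterB (xs.drop i.toNat) i st := by
  induction k with
  | zero =>
    intro i st hi0 hk
    rw [PySem.List.pyRange_one_eq_nil (by omega), List.drop_eq_nil_of_le (by omega)]
    rfl
  | succ k ih =>
    intro i st hi0 hk
    have hin : i < (xs.length : Int) := by omega
    have hlt : i.toNat < xs.length := by omega
    have hdrop : xs.drop i.toNat = xs[i.toNat] :: xs.drop (i.toNat + 1) :=
      List.drop_eq_getElem_cons hlt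
    rw [PySem.List.pyRange_one_cons hin, List.foldl_cons, hdrop, dlOuterB]
    have hget : xs[i.toNat] = PySem.List.pyGetD xs i 0 :=
      (PySem.List.pyGetD_eq_getElem xs 0 hi0 hin).symm
    rw [hget, ← dl_row_eq xs i hi0 hin st]
    have h1 : i.toNat + 1 = (i + 1).toNat := by omega
    rw [h1]
    exact ih (i + 1) _ (by omega) (by omega)

-- ===== VERDICT (by name: the statement is the Claim_ definition above) =====
theorem deepest_lake_depth_spec : Claim_equal_deepest_lake_depth := by
  intro heights _
  unfold Spec_deepest_lake_depth deepest_lake_depth deepest_lake_depth_alt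
  have := dl_outer_eq heights heights.length 0 (0, 0, 0) (le_refl _) (by omega)
  simp only [Int.toNat_zero, List.drop_zero] at this
  exact congrArg (fun st : Int × Int × Int => [st.1, st.2.1, st.2.2]) this
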